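-- pv_equiv track=rewrite | github.com/RamananVr/Leetcodepython | dynamic_programming_dp_string/1745_palindrome_partitioning_iv.py | checkPartitioning
-- ===== SOURCE A (Python) =====
-- def checkPartitioning(s: str) -> bool:
--     """
--     Determines if the string `s` can be split into three non-empty palindromic substrings.
--     """
--     n = len(s)
--
--     # Step 1: Precompute a 2D DP table to check if s[i:j+1] is a palindrome
--     is_palindrome = [[False] * n for _ in range(n)]
--     for i in range(n):
--         is_palindrome[i][i] = True  # Single character is always a palindrome
--     for length in range(2, n + 1):  # Check substrings of length 2 and above
--         for i in range(n - length + 1):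
--             j = i + length - 1
--             if s[i] == s[j]:
--                 if length == 2:
--                     is_palindrome[i][j] = True  # Two-character palindrome
--                 else:
--                     is_palindrome[i][j] = is_palindrome[i + 1][j - 1]  # Check inner substring
--
--     # Step 2: Try all possible partitions into three parts
--     for i in range(1, n - 1):  # First cut
--         if is_palindrome[0][i - 1]:  # First part is a palindrome
--             for j in range(i + 1, n):  # Second cut
--                 if is_palindrome[i][j - 1] and is_palindrome[j][n - 1]:  # Second and third parts are palindromes
--                     return True
--
--     return False
-- ===== SOURCE B (Python) =====
-- def checkPartitioning(s: str) -> bool: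
--     """Split s into three non-empty palindromic substrings?  Direct slice
--     checks instead of a DP table: a part s[l:r] is a palindrome iff it
--     equals its reverse."""
--     n = len(s)
--
--     def pal(l, r):
--         t = s[l:r]
--         return t == t[::-1]
--
--     return any(pal(0, i) and pal(i, j) and pal(j, n)
--                for i in range(1, n - 1)
--                for j in range(i + 1, n))
-- ===== Notes on version B (the rewrite author's own statement) =====
-- stated objective: simpler
-- what changed: Replaced the unconditional O(n^2) interval-DP palindrome table plus guarded double cut loop by a single short-circuiting any over both cut points that tests each of the three parts directly with a slice-equals-its-reverse check (no table at all).
import Mathlib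
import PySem

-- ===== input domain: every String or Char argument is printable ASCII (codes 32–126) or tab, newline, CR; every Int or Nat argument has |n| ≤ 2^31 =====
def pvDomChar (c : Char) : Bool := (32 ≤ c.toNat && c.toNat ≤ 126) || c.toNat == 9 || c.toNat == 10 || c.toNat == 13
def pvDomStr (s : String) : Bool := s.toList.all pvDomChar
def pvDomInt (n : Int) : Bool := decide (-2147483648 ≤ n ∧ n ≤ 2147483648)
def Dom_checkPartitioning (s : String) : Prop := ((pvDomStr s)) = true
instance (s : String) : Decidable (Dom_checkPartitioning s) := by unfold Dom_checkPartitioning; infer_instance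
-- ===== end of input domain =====

-- B replaces A's interval-DP palindrome table + guarded double cut loop by a
-- direct any-over-both-cuts with slice-equals-reverse checks (objective: simpler).

-- ===== PORT A =====
-- the 2D list-of-lists table is modelled as a function Int → Int → Bool;
-- pvUpd is the single-cell assignment is_palindrome[i][j] = b
def pvUpd (t : Int → Int → Bool) (i j : Int) (b : Bool) : Int → Int → Bool :=
  fun i' j' => if i' = i ∧ j' = j then b else t i' j'

-- body of the 'for i' loop inside the 'for length' loop
def pvBody (cs : List Char) (len : Int) (t : Int → Int → Bool) (i : Int) : Int → Int → Bool :=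
  let j := i + len - 1
  if PySem.List.pyGet? cs i = PySem.List.pyGet? cs j then
    if len = 2 then pvUpd t i j true
    else pvUpd t i j (t (i + 1) (j - 1))
  else t

-- one iteration of the 'for length' loop
def pvPass (cs : List Char) (n : Int) (t : Int → Int → Bool) (len : Int) : Int → Int → Bool :=
  (PySem.List.pyRange 0 (n - len + 1) 1).foldl (pvBody cs len) t

-- Step 1: build the is_palindrome table exactly as A does
def pvFill (cs : List Char) (n : Int) : Int → Int → Bool :=
  (PySem.List.pyRange 2 (n + 1) 1).foldl (pvPass cs n)
    ((PySem.List.pyRange 0 n 1).foldl (fun t i => pvUpd t i i true) (fun _ _ => false))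

-- Step 2: the two cut loops with early return
def pvLoopJ (t : Int → Int → Bool) (n i : Int) : List Int → Bool
  | [] => false
  | j :: js => if t i (j - 1) && t j (n - 1) then true else pvLoopJ t n i js

def pvLoopI (t : Int → Int → Bool) (n : Int) : List Int → Bool
  | [] => false
  | i :: is =>
    if t 0 (i - 1) then
      if pvLoopJ t n i (PySem.List.pyRange (i + 1) n 1) then true
      else pvLoopI t n is
    else pvLoopI t n is

def checkPartitioning (s : String) : Bool :=
  let cs := s.toList
  let n : Int := cs.length
  pvLoopI (pvFill cs n) n (PySem.List.pyRange 1 (n - 1) 1)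

-- ===== PORT B =====
-- pal(l, r): s[l:r] equals its reverse
def pvPalB (cs : List Char) (l r : Int) : Bool :=
  let t := PySem.List.slice cs (some l) (some r)
  t == t.reverse

def checkPartitioning_alt (s : String) : Bool :=
  let cs := s.toList
  let n : Int := cs.length
  (PySem.List.pyRange 1 (n - 1) 1).any (fun i =>
    (PySem.List.pyRange (i + 1) n 1).any (fun j =>
      pvPalB cs 0 i && pvPalB cs i j && pvPalB cs j n))

-- ===== PRECONDITION & SPEC =====
def Spec_checkPartitioning (s : String) (out : Bool) : Prop := out = checkPartitioning_alt s
instance (s : String) (out : Bool) : Decidable (Spec_checkPartitioning s out) := by unfold Spec_checkPartitioning; infer_instance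

-- ===== CLAIM (what is proved, stated in full; the proofs are below) =====
def Claim_equal_checkPartitioning : Prop := ∀ (s : String), Dom_checkPartitioning s → Spec_checkPartitioning s (checkPartitioning s)

-- ===== LEMMAS AND PROOFS =====

-- semantic palindrome predicate: cs[a..b] (inclusive) reads the same reversed
def pvSeg (cs : List Char) (a b : Nat) : List Char := (cs.drop a).take (b + 1 - a)
def pvIsPal (cs : List Char) (a b : Nat) : Bool := (pvSeg cs a b).reverse == pvSeg cs a b

-- what A's table contains after processing all lengths ≤ L
def pvTbl (cs : List Char) (L : Int) (l r : Int) : Bool :=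
  decide (0 ≤ l ∧ l ≤ r ∧ r < (cs.length : Int) ∧ r - l + 1 ≤ L) && pvIsPal cs l.toNat r.toNat

-- intermediate state of one length pass: cells with left end < m already updated
def pvMix (cs : List Char) (len m : Int) (l r : Int) : Bool :=
  if r = l + len - 1 ∧ l < m then pvTbl cs len l r else pvTbl cs (len - 1) l r

theorem pvIsPal_self (cs : List Char) (a : Nat) : pvIsPal cs a a = true := by
  have h : a + 1 - a = 1 := by omega
  unfold pvIsPal pvSeg
  rw [h]
  rcases cs.drop a with _ | ⟨x, xs⟩ <;> simp

theorem pvIsPal_lt (cs : List Char) (a b : Nat) (h : a = b + 1) : pvIsPal cs a b = true := by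
  have h2 : b + 1 - a = 0 := by omega
  unfold pvIsPal pvSeg
  rw [h2]; simp

theorem pvSeg_decomp (cs : List Char) (a b : Nat) (hab : a < b) (hb : b < cs.length) :
    pvSeg cs a b = cs[a]'(by omega) :: (pvSeg cs (a + 1) (b - 1) ++ [cs[b]'hb]) := by
  unfold pvSeg
  have ha : a < cs.length := by omega
  have hd : cs.drop a = cs[a]'ha :: cs.drop (a + 1) := List.drop_eq_getElem_cons ha
  rw [hd]
  have h1 : b + 1 - a = (b - a - 1 + 1) + 1 := by omega
  rw [h1, List.take_succ_cons]
  congr 1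
  have h2 : b - 1 + 1 - (a + 1) = b - a - 1 := by omega
  rw [h2]
  have hlen : b - a - 1 < (cs.drop (a+1)).length := by simp; omega
  rw [List.take_add_one, List.getElem?_eq_getElem hlen]
  congr 1
  simp [List.getElem_drop]
  congr 1
  omega

theorem pal_cons_append (x y : Char) (m : List Char) :
    ((x :: (m ++ [y])).reverse == x :: (m ++ [y])) = (x == y && (m.reverse == m)) := by
  rw [Bool.eq_iff_iff]
  simp only [Bool.and_eq_true, beq_iff_eq, List.reverse_cons, List.reverse_append,
    List.cons_append, List.append_assoc]
  constructor
  · rintro h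
    injection h with h1 h2
    subst h1
    refine ⟨rfl, ?_⟩
    have h3 : m.reverse ++ [y] = m ++ [y] := by simpa using h2
    exact List.append_cancel_right h3
  · rintro ⟨h1, h2⟩
    subst h1
    simp [h2]

theorem pvIsPal_rec (cs : List Char) (a b : Nat) (hab : a < b) (hb : b < cs.length) :
    pvIsPal cs a b = ((cs[a]'(by omega) == cs[b]'hb) && pvIsPal cs (a + 1) (b - 1)) := by
  unfold pvIsPal
  rw [pvSeg_decomp cs a b hab hb]
  exact pal_cons_append _ _ _

theorem diag_fold (L : List Int) (t : Int → Int → Bool) (l r : Int) :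
    (L.foldl (fun t i => pvUpd t i i true) t) l r
      = if l = r ∧ l ∈ L then true else t l r := by
  induction L generalizing t with
  | nil => simp
  | cons x xs ih =>
    simp only [List.foldl_cons, ih, List.mem_cons]
    unfold pvUpd
    by_cases h1 : l = r ∧ l ∈ xs
    · simp [h1, Bool.or_comm, Bool.or_assoc]
    · simp only [if_neg h1]
      by_cases h2 : l = x ∧ r = x
      · simp [h2]
      · rw [if_neg h2, if_neg]
        rintro ⟨h3, h4 | h4⟩
        · exact h2 ⟨h4, h3 ▸ h4⟩
        · exact h1 ⟨h3, h4⟩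

theorem diag_eq (cs : List Char) :
    ((PySem.List.pyRange 0 (cs.length : Int) 1).foldl (fun t i => pvUpd t i i true)
      (fun _ _ => false)) = pvTbl cs 1 := by
  funext l r
  rw [diag_fold]
  unfold pvTbl
  by_cases h : l = r ∧ l ∈ PySem.List.pyRange 0 (cs.length : Int) 1
  · rw [if_pos h]
    obtain ⟨h1, h2⟩ := h
    rw [PySem.List.mem_pyRange_one] at h2
    subst h1
    rw [pvIsPal_self, decide_eq_true (by omega), Bool.true_and]
  · rw [if_neg h]
    rw [PySem.List.mem_pyRange_one] at h
    by_cases harith : 0 ≤ l ∧ l ≤ r ∧ r < (cs.length : Int) ∧ r - l + 1 ≤ 1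
    · exfalso; apply h; constructor <;> omega
    · rw [decide_eq_false harith, Bool.false_and]

theorem mix_zero (cs : List Char) (len : Int) : pvMix cs len 0 = pvTbl cs (len - 1) := by
  funext l r
  unfold pvMix pvTbl
  by_cases h : r = l + len - 1 ∧ l < 0
  · rw [if_pos h]
    rw [decide_eq_false (by omega), decide_eq_false (by omega)]
  · rw [if_neg h]

theorem mix_full (cs : List Char) (len : Int) (hlen2 : 2 ≤ len) :
    pvMix cs len ((cs.length : Int) - len + 1) = pvTbl cs len := by
  funext l r
  unfold pvMix pvTbl
  by_cases h : r = l + len - 1 ∧ l < (cs.length : Int) - len + 1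
  · rw [if_pos h]
  · rw [if_neg h]
    by_cases hA : 0 ≤ l ∧ l ≤ r ∧ r < (cs.length : Int) ∧ r - l + 1 ≤ len - 1
    · rw [decide_eq_true hA, decide_eq_true (by omega)]
    · by_cases hB : 0 ≤ l ∧ l ≤ r ∧ r < (cs.length : Int) ∧ r - l + 1 ≤ len
      · exfalso
        -- r-l+1 ≤ len but not ≤ len-1 forces r = l+len-1, and then ¬h forces r ≥ length
        apply h
        constructor <;> omega
      · rw [decide_eq_false hA, decide_eq_false hB]

-- cells other than (m, m+len-1) do not change when the boundary moves from m to m+1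
theorem mix_step_other (cs : List Char) (len m l r : Int)
    (h : ¬ (l = m ∧ r = m + len - 1)) :
    pvMix cs len m l r = pvMix cs len (m + 1) l r := by
  unfold pvMix
  by_cases hA : r = l + len - 1 ∧ l < m
  · rw [if_pos hA, if_pos ⟨hA.1, by omega⟩]
  · rw [if_neg hA, if_neg]
    rintro ⟨hB1, hB2⟩
    by_cases hlm : l = m
    · exact h ⟨hlm, by omega⟩
    · exact hA ⟨hB1, by omega⟩

theorem body_step (cs : List Char) (len m : Int) (h2 : 2 ≤ len) (hm : 0 ≤ m)
    (hj : m + len - 1 < (cs.length : Int)) :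
    pvBody cs len (pvMix cs len m) m = pvMix cs len (m + 1) := by
  have hmlt : m < (cs.length : Int) := by omega
  have hj0 : (0:Int) ≤ m + len - 1 := by omega
  have hmN : m.toNat < cs.length := by omega
  have hjN : (m + len - 1).toNat < cs.length := by omega
  have habN : m.toNat < (m + len - 1).toNat := by omega
  have hgm : PySem.List.pyGet? cs m = some (cs[m.toNat]'hmN) :=
    PySem.List.pyGet?_eq_some_getElem cs hm hmlt
  have hgj : PySem.List.pyGet? cs (m + len - 1) = some (cs[(m + len - 1).toNat]'hjN) :=
    PySem.List.pyGet?_eq_some_getElem cs hj0 hj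
  -- the value the table must hold at the written cell
  have hcellval : ∀ _hcEq : (cs[m.toNat]'hmN == cs[(m + len - 1).toNat]'hjN) = true,
      pvMix cs len (m + 1) m (m + len - 1) = pvIsPal cs (m.toNat + 1) ((m + len - 1).toNat - 1) := by
    intro hcEq
    unfold pvMix
    rw [if_pos ⟨rfl, by omega⟩]
    unfold pvTbl
    rw [decide_eq_true (by omega), Bool.true_and]
    rw [pvIsPal_rec cs m.toNat ((m + len - 1).toNat) habN hjN, hcEq, Bool.true_and]
  unfold pvBody
  by_cases hc : PySem.List.pyGet? cs m = PySem.List.pyGet? cs (m + len - 1)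
  · simp only [if_pos hc]
    have hchars : (cs[m.toNat]'hmN == cs[(m + len - 1).toNat]'hjN) = true := by
      rw [hgm, hgj] at hc
      exact beq_iff_eq.mpr (Option.some.inj hc)
    by_cases hl2 : len = 2
    · rw [if_pos hl2]
      funext l r
      unfold pvUpd
      by_cases hcell : l = m ∧ r = m + len - 1
      · rw [if_pos hcell]
        rw [hcell.1, hcell.2, hcellval hchars]
        rw [pvIsPal_lt cs (m.toNat + 1) ((m + len - 1).toNat - 1) (by omega)]
      · rw [if_neg hcell]
        exact mix_step_other cs len m l r hcell
    · rw [if_neg hl2]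
      funext l r
      unfold pvUpd
      by_cases hcell : l = m ∧ r = m + len - 1
      · rw [if_pos hcell]
        rw [hcell.1, hcell.2, hcellval hchars]
        -- the read cell (m+1, m+len-2) has gap len-2 ≠ len-1, so it still holds the old value
        have hread : pvMix cs len m (m + 1) (m + len - 1 - 1) = pvTbl cs (len - 1) (m + 1) (m + len - 1 - 1) := by
          unfold pvMix
          rw [if_neg]
          rintro ⟨hB, -⟩
          omega
        rw [hread]
        unfold pvTbl
        rw [decide_eq_true (by omega), Bool.true_and]
        congr 1 <;> omega
      · rw [if_neg hcell]
        exact mix_step_other cs len m l r hcell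
  · simp only [if_neg hc]
    funext l r
    by_cases hcell : l = m ∧ r = m + len - 1
    · have hne : (cs[m.toNat]'hmN == cs[(m + len - 1).toNat]'hjN) = false := by
        rw [hgm, hgj] at hc
        exact beq_eq_false_iff_ne.mpr (fun h => hc (congrArg some h))
      have hL : pvMix cs len m m (m + len - 1) = false := by
        unfold pvMix
        rw [if_neg (by rintro ⟨-, h⟩; omega)]
        unfold pvTbl
        rw [decide_eq_false (by omega), Bool.false_and]
      have hR : pvMix cs len (m + 1) m (m + len - 1) = false := by
        unfold pvMix
        rw [if_pos ⟨rfl, by omega⟩]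
        unfold pvTbl
        rw [pvIsPal_rec cs m.toNat ((m + len - 1).toNat) habN hjN, hne, Bool.false_and, Bool.and_false]
      rw [hcell.1, hcell.2, hL, hR]
    · exact mix_step_other cs len m l r hcell

theorem fold_mix (cs : List Char) (len : Int) (h2 : 2 ≤ len) (hi : Int)
    (hhi : hi ≤ (cs.length : Int) - len + 1) :
    ∀ (k : Nat) (m : Int), 0 ≤ m → m + (k : Int) = hi →
      (PySem.List.pyRange m hi 1).foldl (pvBody cs len) (pvMix cs len m) = pvMix cs len hi := by
  intro k
  induction k with
  | zero =>
    intro m hm hmk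
    rw [PySem.List.pyRange_one_eq_nil (by omega)]
    simp only [List.foldl_nil]
    rw [show m = hi by omega]
  | succ k ih =>
    intro m hm hmk
    rw [PySem.List.pyRange_one_cons (by push_cast at hmk ⊢; omega)]
    simp only [List.foldl_cons]
    rw [body_step cs len m h2 hm (by push_cast at hmk ⊢; omega)]
    exact ih (m + 1) (by omega) (by push_cast at hmk ⊢; omega)

theorem pass_eq (cs : List Char) (len : Int) (h2 : 2 ≤ len) (hle : len ≤ (cs.length : Int)) :
    pvPass cs (cs.length : Int) (pvTbl cs (len - 1)) len = pvTbl cs len := by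
  unfold pvPass
  rw [← mix_zero cs len, ← mix_full cs len h2]
  exact fold_mix cs len h2 _ (by omega) ((cs.length : Int) - len + 1).toNat 0 (by omega) (by omega)

theorem fold_pass (cs : List Char) :
    ∀ (k : Nat) (a : Int), 2 ≤ a → a + (k : Int) ≤ (cs.length : Int) + 1 →
      (PySem.List.pyRange a (a + (k : Int)) 1).foldl (pvPass cs (cs.length : Int)) (pvTbl cs (a - 1))
        = pvTbl cs (a - 1 + (k : Int)) := by
  intro k
  induction k with
  | zero =>
    intro a ha hak
    rw [PySem.List.pyRange_one_eq_nil (by omega)]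
    simp
  | succ k ih =>
    intro a ha hak
    rw [PySem.List.pyRange_one_cons (by push_cast; omega)]
    simp only [List.foldl_cons]
    rw [show pvPass cs (cs.length : Int) (pvTbl cs (a - 1)) a = pvTbl cs ((a + 1) - 1) by
      rw [pass_eq cs a ha (by push_cast at hak; omega)]; norm_num]
    have h' := ih (a + 1) (by omega) (by push_cast at hak ⊢; omega)
    push_cast
    rw [show a + ((k : Int) + 1) = (a + 1) + (k : Int) by ring,
        show a - 1 + ((k : Int) + 1) = a + 1 - 1 + (k : Int) by ring]
    exact h'

theorem fill_eq (cs : List Char) (h1 : 1 ≤ (cs.length : Int)) :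
    pvFill cs (cs.length : Int) = pvTbl cs (cs.length : Int) := by
  unfold pvFill
  rw [diag_eq cs]
  have hk : ((cs.length : Int) + 1) = 2 + (((cs.length : Int) - 1).toNat : Int) := by omega
  rw [hk]
  rw [show pvTbl cs 1 = pvTbl cs (2 - 1) by norm_num]
  rw [fold_pass cs ((cs.length : Int) - 1).toNat 2 (by omega) (by omega)]
  congr 1
  omega

theorem loopJ_any (t : Int → Int → Bool) (n i : Int) (js : List Int) :
    pvLoopJ t n i js = js.any (fun j => t i (j - 1) && t j (n - 1)) := by
  induction js with
  | nil => rfl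
  | cons j js ih =>
    unfold pvLoopJ
    rcases Bool.eq_false_or_eq_true (t i (j - 1) && t j (n - 1)) with h | h <;>
      simp [h, ih]

theorem loopI_any (t : Int → Int → Bool) (n : Int) (is : List Int) :
    pvLoopI t n is = is.any (fun i =>
      t 0 (i - 1) && pvLoopJ t n i (PySem.List.pyRange (i + 1) n 1)) := by
  induction is with
  | nil => rfl
  | cons i is ih =>
    unfold pvLoopI
    rcases Bool.eq_false_or_eq_true (t 0 (i - 1)) with h | h
    · simp [h, ih]
    · rcases Bool.eq_false_or_eq_true (pvLoopJ t n i (PySem.List.pyRange (i + 1) n 1)) with h2 | h2 <;>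
        simp [h, h2, ih]

theorem any_congr_mem {α : Type} (L : List α) (f g : α → Bool)
    (h : ∀ x ∈ L, f x = g x) : L.any f = L.any g := by
  induction L with
  | nil => rfl
  | cons x xs ih =>
    simp only [List.any_cons]
    rw [h x (by simp), ih (fun y hy => h y (by simp [hy]))]

theorem any_and_left {α : Type} (L : List α) (a : Bool) (f : α → Bool) :
    L.any (fun x => a && f x) = (a && L.any f) := by
  cases a <;> simp

theorem palB_eq (cs : List Char) (l r : Int) (h0 : 0 ≤ l) (hlr : l < r)
    (_hr : r ≤ (cs.length : Int)) :
    pvPalB cs l r = pvIsPal cs l.toNat (r.toNat - 1) := by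
  unfold pvPalB pvIsPal pvSeg
  rw [PySem.List.slice_toNat cs h0 (by omega)]
  rw [show r.toNat - 1 + 1 - l.toNat = r.toNat - l.toNat by omega]
  rw [Bool.eq_iff_iff, beq_iff_eq, beq_iff_eq]
  exact eq_comm

theorem main_eq (cs : List Char) :
    pvLoopI (pvFill cs (cs.length : Int)) (cs.length : Int)
        (PySem.List.pyRange 1 ((cs.length : Int) - 1) 1)
      = (PySem.List.pyRange 1 ((cs.length : Int) - 1) 1).any (fun i =>
          (PySem.List.pyRange (i + 1) (cs.length : Int) 1).any (fun j =>
            pvPalB cs 0 i && pvPalB cs i j && pvPalB cs j (cs.length : Int))) := by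
  by_cases hn : (cs.length : Int) ≤ 2
  · rw [PySem.List.pyRange_one_eq_nil (by omega)]
    simp [pvLoopI]
  · have h1 : 1 ≤ (cs.length : Int) := by omega
    rw [fill_eq cs h1, loopI_any]
    apply any_congr_mem
    intro i hi
    rw [PySem.List.mem_pyRange_one] at hi
    rw [loopJ_any]
    simp only [Bool.and_assoc]
    rw [any_and_left]
    congr 1
    · unfold pvTbl
      rw [decide_eq_true (by omega), Bool.true_and]
      rw [palB_eq cs 0 i (by omega) (by omega) (by omega)]
      congr 1
      omega
    · apply any_congr_mem
      intro j hj
      rw [PySem.List.mem_pyRange_one] at hj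
      congr 1
      · unfold pvTbl
        rw [decide_eq_true (by omega), Bool.true_and]
        rw [palB_eq cs i j (by omega) (by omega) (by omega)]
        congr 1
        omega
      · unfold pvTbl
        rw [decide_eq_true (by omega), Bool.true_and]
        rw [palB_eq cs j (cs.length : Int) (by omega) (by omega) (by omega)]
        congr 1
        omega

-- ===== VERDICT (by name: the statement is the Claim_ definition above) =====
theorem checkPartitioning_spec : Claim_equal_checkPartitioning := by
  intro s _
  show checkPartitioning s = checkPartitioning_alt s
  simp only [checkPartitioning, checkPartitioning_alt]
  exact main_eq s.toList
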